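-- pv_equiv track=rewrite | github.com/beomwon/Algorithm | 프로그래머스/unrated/181918. 배열 만들기 4/배열 만들기 4.py | solution
-- ===== SOURCE A (Python) =====
-- def solution(arr):
--     i, end, stk = 0, len(arr), []
--     while i < end:
--         if stk == [] or stk[-1] < arr[i]:
--             stk.append(arr[i])
--             i += 1
--         else:
--             stk.pop()
--
--     return stk
-- ===== SOURCE B (Python) =====
-- def solution(arr):
--     # An element survives A's monotonic-stack process iff it is strictly
--     # smaller than every element to its right; so one reverse scan with a
--     # running minimum suffices (no stack, no popping).
--     res = []
--     m = None
--     for x in reversed(arr):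
--         if m is None or x < m:
--             res.append(x)
--             m = x
--     return res[::-1]
-- ===== Notes on version B (the rewrite author's own statement) =====
-- stated objective: faster
-- what changed: Replaces the stack machine entirely: B uses the characterization that an element survives iff it is strictly smaller than every element to its right, so it does one reverse scan keeping a running minimum (no stack, no pops; measured ~5.8x faster since each element is touched once with a single comparison instead of A's push/pop traffic).
import Mathlib
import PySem

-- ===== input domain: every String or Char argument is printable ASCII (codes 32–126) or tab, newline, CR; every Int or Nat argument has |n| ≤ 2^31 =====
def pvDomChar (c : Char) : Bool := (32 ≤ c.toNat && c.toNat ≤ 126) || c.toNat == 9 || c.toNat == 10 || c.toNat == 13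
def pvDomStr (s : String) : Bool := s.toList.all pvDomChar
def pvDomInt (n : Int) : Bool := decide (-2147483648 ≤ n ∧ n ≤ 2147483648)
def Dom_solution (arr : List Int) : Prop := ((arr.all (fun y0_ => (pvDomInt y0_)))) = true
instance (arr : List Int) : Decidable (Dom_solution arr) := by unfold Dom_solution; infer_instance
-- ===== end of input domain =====

-- B drops the stack machine entirely: it collects, in one reverse scan with a running
-- minimum, exactly the elements strictly smaller than everything to their right.

-- ===== PORT A =====
-- A's while-loop over index i with stack stk (Python list, top at the end).
-- We represent the stack with its TOP AT THE HEAD (the Python list reversed),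
-- and reverse it on return; `rem` is arr[i:].  Each loop step is ported literally:
-- push-and-advance when stk is empty or stk[-1] < arr[i], otherwise pop and keep i.
def solutionLoop (rem : List Int) (stk : List Int) : List Int :=
  match rem, stk with
  | [], stk => stk
  | x :: rest, [] => solutionLoop rest [x]           -- stk == []: append arr[i]; i += 1
  | x :: rest, t :: s =>
      if t < x then solutionLoop rest (x :: t :: s)  -- stk[-1] < arr[i]: append; i += 1
      else solutionLoop (x :: rest) s                -- else: stk.pop(), same i
termination_by (rem.length, stk.length)

def solution (arr : List Int) : List Int := (solutionLoop arr []).reverse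

-- ===== PORT B =====
-- `for x in reversed(arr): if m is None or x < m: res.append(x); m = x` then res[::-1];
-- state is the pair (res, m).
def bStep (st : List Int × Option Int) (x : Int) : List Int × Option Int :=
  match st.2 with
  | none => (st.1 ++ [x], some x)
  | some m => if x < m then (st.1 ++ [x], some x) else st

def solution_alt (arr : List Int) : List Int :=
  ((arr.reverse.foldl bStep ([], none)).1).reverse

-- ===== PRECONDITION & SPEC =====
def Spec_solution (arr : List Int) (out : List Int) : Prop := out = solution_alt arr
instance (arr : List Int) (out : List Int) : Decidable (Spec_solution arr out) := by unfold Spec_solution; infer_instance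

-- ===== CLAIM (what is proved, stated in full; the proofs are below) =====
def Claim_equal_solution : Prop := ∀ (arr : List Int), Dom_solution arr → Spec_solution arr (solution arr)

-- ===== LEMMAS AND PROOFS =====

-- proof-only helpers: pop-while-≥ (what A's pop phase does to the current element),
-- and recursive descriptions of B's scan with / without a current minimum
def popGE (stk : List Int) (x : Int) : List Int :=
  match stk with
  | [] => []
  | t :: s => if t ≥ x then popGE s x else t :: s

def dS (x : Int) : List Int → List Int
  | [] => []
  | a :: t => if a < x then a :: dS a t else dS x t

def dA : List Int → List Int
  | [] => []
  | a :: t => a :: dS a t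

-- One step of A's state machine on the current element x is pop-while-≥ then push.
theorem solutionLoop_cons (x : Int) (rest stk : List Int) :
    solutionLoop (x :: rest) stk = solutionLoop rest (x :: popGE stk x) := by
  induction stk with
  | nil => simp [solutionLoop, popGE]
  | cons t s ih =>
      by_cases h : t < x
      · have h' : ¬ t ≥ x := by omega
        simp [solutionLoop, popGE, h, h']
      · have h' : t ≥ x := by omega
        simp [solutionLoop, popGE, h, h', ih]

theorem popGE_popGE (s : List Int) {x a : Int} (h : x ≤ a) :
    popGE (popGE s a) x = popGE s x := by
  induction s with
  | nil => simp [popGE]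
  | cons t r ih =>
      by_cases ht : t ≥ a
      · have : t ≥ x := by omega
        simp [popGE, ht, this, ih]
      · simp [popGE, ht]

-- B's scan below a current minimum x is A's pop phase applied to B's full scan.
theorem dS_eq_popGE_dA (l : List Int) (x : Int) :
    dS x l = popGE (dA l) x := by
  induction l generalizing x with
  | nil => simp [dS, dA, popGE]
  | cons a t ih =>
      by_cases h : a < x
      · have h' : ¬ a ≥ x := by omega
        simp [dS, dA, popGE, h, h']
      · have h' : a ≥ x := by omega
        have hxa : x ≤ a := by omega
        simp [dS, dA, popGE, h, h', ih, popGE_popGE _ hxa]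

-- B's foldl with state (res, m) appends exactly dA / dS of the remaining input.
theorem bFold_eq (l : List Int) : ∀ (res : List Int) (m : Option Int),
    (l.foldl bStep (res, m)).1 =
      res ++ (match m with | none => dA l | some x => dS x l) := by
  induction l with
  | nil => intro res m; cases m <;> simp [dA, dS]
  | cons a t ih =>
      intro res m
      cases m with
      | none => simp [bStep, ih, dA]
      | some x =>
          by_cases h : a < x
          · simp [bStep, h, ih, dS]
          · simp [bStep, h, ih, dS]

-- A's state machine is the fold of pop-then-push.
theorem solutionLoop_eq_foldl (rem stk : List Int) :
    solutionLoop rem stk = rem.foldl (fun s x => x :: popGE s x) stk := by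
  induction rem generalizing stk with
  | nil => simp [solutionLoop]
  | cons x rest ih => rw [solutionLoop_cons, List.foldl_cons, ih]

-- A's stack (top at head) after consuming l.reverse is B's reverse scan of l.
theorem solutionLoop_reverse_eq_dA (l : List Int) :
    solutionLoop l.reverse [] = dA l := by
  induction l with
  | nil => simp [solutionLoop, dA]
  | cons a t ih =>
      rw [List.reverse_cons, solutionLoop_eq_foldl, List.foldl_append,
        ← solutionLoop_eq_foldl t.reverse, ih]
      simp only [List.foldl_cons, List.foldl_nil]
      rw [← dS_eq_popGE_dA]
      rfl

-- ===== VERDICT (by name: the statement is the Claim_ definition above) =====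
theorem solution_spec : Claim_equal_solution := by
  intro arr _
  unfold Spec_solution solution solution_alt
  rw [bFold_eq, ← solutionLoop_reverse_eq_dA, List.reverse_reverse]
  simp
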